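-- pv_equiv track=rewrite | github.com/iaprojectg8/G8-Tool | indicators/calculation.py | reset_cumsum
-- ===== SOURCE A (Python) =====
-- def reset_cumsum(group):
--     cumsum = 0
--     result = []
--     for val in group:
--         if val == 0:
--             cumsum = 0
--         else:
--             cumsum += val
--         result.append(cumsum)
--     return result
-- ===== SOURCE B (Python) =====
-- def reset_cumsum(group):
--     # Two-stage algorithm: build the global prefix-sum array once, then each
--     # output is a difference of two prefix sums: the one at i+1 minus the one
--     # at the position just after the most recent zero.
--     prefix = [0]
--     s = 0
--     for v in group:
--         s += v
--         prefix.append(s)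
--     out = []
--     base = 0  # prefix index of the most recent reset
--     for i, v in enumerate(group):
--         if v == 0:
--             base = i + 1
--         out.append(prefix[i + 1] - prefix[base])
--     return out
-- ===== Notes on version B (the rewrite author's own statement) =====
-- stated objective: alternative
-- what changed: Instead of carrying a reset-on-zero running accumulator, B builds the global prefix-sum array once and computes each output as prefix[i+1] - prefix[base], the difference of two global prefix sums around the segment since the last zero.
import Mathlib
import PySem

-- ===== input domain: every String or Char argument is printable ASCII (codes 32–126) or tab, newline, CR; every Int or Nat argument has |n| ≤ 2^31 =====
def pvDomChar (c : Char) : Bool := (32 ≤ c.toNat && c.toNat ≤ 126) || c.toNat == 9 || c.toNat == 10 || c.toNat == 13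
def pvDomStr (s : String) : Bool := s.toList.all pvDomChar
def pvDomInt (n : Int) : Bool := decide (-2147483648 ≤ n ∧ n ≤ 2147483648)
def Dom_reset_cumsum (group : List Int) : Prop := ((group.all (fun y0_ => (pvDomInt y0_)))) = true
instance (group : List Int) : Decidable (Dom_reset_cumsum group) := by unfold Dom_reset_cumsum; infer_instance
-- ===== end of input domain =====

-- B replaces A's reset-on-zero running accumulator by a two-stage algorithm:
-- a global prefix-sum array, then each output is a difference of two prefix sums.

-- ===== PORT A =====
-- literal port of A's loop: state (cumsum, result), result appended at the back
def reset_cumsum (group : List Int) : List Int :=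
  (group.foldl (fun (st : Int × List Int) val =>
      let cumsum := if val = 0 then 0 else st.1 + val
      (cumsum, st.2 ++ [cumsum])) (0, [])).2

-- ===== PORT B =====
-- first loop of Source B: running sum s, appending to prefix (here built structurally)
def pvPrefixLoop (s : Int) : List Int → List Int
  | [] => []
  | v :: vs => (s + v) :: pvPrefixLoop (s + v) vs

def pvPrefix (group : List Int) : List Int := 0 :: pvPrefixLoop 0 group

-- second loop of Source B: enumerate index i, base index of most recent reset;
-- prefix[i+1] and prefix[base] are always in range, so List.getD is exact here.
def pvOutLoop (pre : List Int) : List Int → Nat → Nat → List Int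
  | [], _, _ => []
  | v :: vs, i, base =>
      let base' := if v = 0 then i + 1 else base
      (pre.getD (i + 1) 0 - pre.getD base' 0) :: pvOutLoop pre vs (i + 1) base'

def reset_cumsum_alt (group : List Int) : List Int :=
  pvOutLoop (pvPrefix group) group 0 0

-- ===== PRECONDITION & SPEC =====
def Spec_reset_cumsum (group : List Int) (out : List Int) : Prop := out = reset_cumsum_alt group
instance (group : List Int) (out : List Int) : Decidable (Spec_reset_cumsum group out) := by unfold Spec_reset_cumsum; infer_instance

-- ===== CLAIM =====
def Claim_equal_reset_cumsum : Prop := ∀ (group : List Int), Dom_reset_cumsum group → Spec_reset_cumsum group (reset_cumsum group)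

-- ===== LEMMAS AND PROOFS =====
-- common reference: the reset-on-zero scan
def pvScan (c : Int) : List Int → List Int
  | [] => []
  | v :: vs =>
      let c' := if v = 0 then 0 else c + v
      c' :: pvScan c' vs

theorem pv_foldl_inv (xs : List Int) (c : Int) (acc : List Int) :
    (xs.foldl (fun (st : Int × List Int) val =>
      let cumsum := if val = 0 then 0 else st.1 + val
      (cumsum, st.2 ++ [cumsum])) (c, acc)).2 = acc ++ pvScan c xs := by
  induction xs generalizing c acc with
  | nil => simp [pvScan]
  | cons v vs ih =>
      simp only [List.foldl, pvScan]
      rw [ih]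
      simp

theorem pv_prefix_getD (vs : List Int) (s : Int) (j : Nat) (hj : j ≤ vs.length) :
    (s :: pvPrefixLoop s vs).getD j 0 = s + (vs.take j).sum := by
  induction vs generalizing s j with
  | nil =>
      simp only [Nat.le_zero, List.length_nil] at hj
      subst hj
      simp
  | cons v vs ih =>
      cases j with
      | zero => simp
      | succ k =>
          simp only [pvPrefixLoop, List.getD_cons_succ]
          rw [ih (s + v) k (by simpa using hj)]
          simp [List.take_succ_cons]
          ring

theorem pv_getD (g : List Int) (j : Nat) (hj : j ≤ g.length) :
    (pvPrefix g).getD j 0 = (g.take j).sum := by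
  unfold pvPrefix
  rw [pv_prefix_getD g 0 j hj]
  ring

theorem pv_out_inv (vs u : List Int) (b : Nat) (hb : b ≤ u.length) :
    pvOutLoop (pvPrefix (u ++ vs)) vs u.length b
      = pvScan ((pvPrefix (u ++ vs)).getD u.length 0 - (pvPrefix (u ++ vs)).getD b 0) vs := by
  induction vs generalizing u b with
  | nil => simp [pvOutLoop, pvScan]
  | cons v vs ih =>
      have hlen : u.length + 1 ≤ (u ++ v :: vs).length := by simp
      have hblen : b ≤ (u ++ v :: vs).length := by simp; omega
      have hulen : u.length ≤ (u ++ v :: vs).length := by simp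
      have hstep : (pvPrefix (u ++ v :: vs)).getD (u.length + 1) 0
          = (pvPrefix (u ++ v :: vs)).getD u.length 0 + v := by
        rw [pv_getD _ _ hlen, pv_getD _ _ hulen]
        have h1 : (u ++ v :: vs).take (u.length + 1) = u ++ [v] := by
          rw [List.take_length_add_append 1]
          simp
        have h2 : (u ++ v :: vs).take u.length = u := List.take_left
        rw [h1, h2]
        simp
      have hassoc : u ++ v :: vs = (u ++ [v]) ++ vs := by simp
      simp only [pvOutLoop, pvScan]
      by_cases hv : v = 0
      · subst hv
        simp only [↓reduceIte, sub_self]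
        rw [hassoc]
        rw [show u.length + 1 = (u ++ [(0 : Int)]).length by simp]
        rw [ih (u ++ [0]) (u ++ [(0 : Int)]).length le_rfl]
        simp
      · simp only [if_neg hv]
        have := ih (u ++ [v]) b (by simp; omega)
        rw [hassoc]
        rw [show u.length + 1 = (u ++ [v]).length by simp] at hstep ⊢
        rw [this]
        congr 1
        · rw [← hassoc, hstep]; ring
        · congr 1
          rw [← hassoc, hstep]
          ring

theorem pv_alt_eq_scan (g : List Int) : reset_cumsum_alt g = pvScan 0 g := by
  unfold reset_cumsum_alt
  have := pv_out_inv g [] 0 (by simp)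
  simpa using this

-- ===== VERDICT =====
theorem reset_cumsum_spec : Claim_equal_reset_cumsum := by
  intro group _
  unfold Spec_reset_cumsum reset_cumsum
  rw [pv_alt_eq_scan, pv_foldl_inv]
  simp
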